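-- pv_equiv track=rewrite | github.com/EpikGaming/leetcode | 2021_Aug/552-学生出勤记录II.py | checkRecord2
-- ===== SOURCE A (Python) =====
-- def checkRecord2(n: int):
--     MOD = 10 ** 9 + 7
--     dp = [[0 for _ in range(3)] for _ in range(2)]
--     dp[0][0] = 1
--     for i in range(1, n + 1):
--         newDP = [[0 for _ in range(3)] for _ in range(2)]
--
--         for j in range(0, 2):
--             for k in range(0, 3):
--                 newDP[j][0] = (newDP[j][0] + dp[j][k]) % MOD
--
--         for k in range(0, 3):
--             newDP[1][0] = (newDP[1][0] + dp[0][k]) % MOD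
--
--         for j in range(0, 2):
--             for k in range(1, 3):
--                 newDP[j][k] = (newDP[j][k] + dp[j][k - 1]) % MOD
--         dp = newDP
--
--     res = 0
--     for j in range(0, 2):
--         for k in range(0, 3):
--             res += dp[j][k]
--     return dp, res % MOD
-- ===== SOURCE B (Python) =====
-- def checkRecord2(n: int):
--     MOD = 10 ** 9 + 7
--
--     # states: (no A, 0 trailing L), (no A, 1 L), (no A, 2 L),
--     #         (one A, 0 L), (one A, 1 L), (one A, 2 L)
--     def mat_mult(A, B):
--         return [[sum(A[i][k] * B[k][j] for k in range(6)) % MOD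
--                  for j in range(6)] for i in range(6)]
--
--     def mat_pow(M, e):
--         if e <= 0:
--             return [[1 if i == j else 0 for j in range(6)] for i in range(6)]
--         half = mat_pow(M, e // 2)
--         sq = mat_mult(half, half)
--         return mat_mult(sq, M) if e % 2 else sq
--
--     T = [[1, 1, 1, 0, 0, 0],
--          [1, 0, 0, 0, 0, 0],
--          [0, 1, 0, 0, 0, 0],
--          [1, 1, 1, 1, 1, 1],
--          [0, 0, 0, 1, 0, 0],
--          [0, 0, 0, 0, 1, 0]]
--     P = mat_pow(T, n)
--     v = [1, 0, 0, 0, 0, 0]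
--     w = [sum(P[i][k] * v[k] for k in range(6)) % MOD for i in range(6)]
--     return [w[:3], w[3:]], sum(w) % MOD
-- ===== Notes on version B (the rewrite author's own statement) =====
-- stated objective: faster
-- what changed: Replaces the O(n) per-step DP loop by fast exponentiation of the 6x6 state-transition matrix (square-and-multiply), applying the n-th matrix power to the initial state vector once.
import Mathlib
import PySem

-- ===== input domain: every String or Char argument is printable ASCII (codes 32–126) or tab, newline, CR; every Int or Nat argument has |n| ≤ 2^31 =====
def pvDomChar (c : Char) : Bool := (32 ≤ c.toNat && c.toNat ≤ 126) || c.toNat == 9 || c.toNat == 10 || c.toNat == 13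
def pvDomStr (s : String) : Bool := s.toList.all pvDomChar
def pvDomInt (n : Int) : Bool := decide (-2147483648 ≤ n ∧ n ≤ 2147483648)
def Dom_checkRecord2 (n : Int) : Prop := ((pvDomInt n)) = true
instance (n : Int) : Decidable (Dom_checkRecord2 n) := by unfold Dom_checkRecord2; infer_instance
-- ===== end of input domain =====

-- B replaces A's O(n) step-by-step DP by fast exponentiation of the 6x6 transition matrix
-- (square-and-multiply), applying the n-th matrix power to the initial state vector once: O(log n).


-- ===== PORT A =====
-- dp[j][k] read (indices are in-range literals in A)
def pvAget (dp : List (List Int)) (j k : Int) : Int :=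
  PySem.List.pyGetD (PySem.List.pyGetD dp j []) k 0

-- one outer-loop body of A; the constant-range inner loops (range(0,2), range(0,3), range(1,3))
-- are unrolled in exactly A's iteration order, each update keeping A's `(acc + x) % MOD` shape.
def pvAstep (dp : List (List Int)) : List (List Int) :=
  let MOD : Int := 10 ^ 9 + 7
  -- first loop: newDP[j][0] += dp[j][k], j = 0,1; k = 0,1,2
  let n00 := ((((0 + pvAget dp 0 0) % MOD) + pvAget dp 0 1) % MOD + pvAget dp 0 2) % MOD
  let n10 := ((((0 + pvAget dp 1 0) % MOD) + pvAget dp 1 1) % MOD + pvAget dp 1 2) % MOD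
  -- second loop: newDP[1][0] += dp[0][k], k = 0,1,2
  let n10 := (((n10 + pvAget dp 0 0) % MOD + pvAget dp 0 1) % MOD + pvAget dp 0 2) % MOD
  -- third loop: newDP[j][k] += dp[j][k-1], j = 0,1; k = 1,2
  let n01 := (0 + pvAget dp 0 0) % MOD
  let n02 := (0 + pvAget dp 0 1) % MOD
  let n11 := (0 + pvAget dp 1 0) % MOD
  let n12 := (0 + pvAget dp 1 1) % MOD
  [[n00, n01, n02], [n10, n11, n12]]

def checkRecord2 (n : Int) : List (List Int) × Int :=
  let MOD : Int := 10 ^ 9 + 7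
  let dp : List (List Int) := [[1, 0, 0], [0, 0, 0]]   -- dp[0][0] = 1
  let dp := (PySem.List.pyRange 1 (n + 1) 1).foldl (fun dp _ => pvAstep dp) dp
  -- final double loop summing all six entries, unrolled in order
  let res := 0 + pvAget dp 0 0 + pvAget dp 0 1 + pvAget dp 0 2
               + pvAget dp 1 0 + pvAget dp 1 1 + pvAget dp 1 2
  (dp, res % MOD)

-- ===== PORT B =====
-- B's matrices are 6x6 lists of rows; A[i][k] on them is `getD` (every access in Source B is by an
-- in-range nonnegative index on a 6x6 matrix, where Python indexing = getD).
def pvGet (A : List (List Int)) (i k : Nat) : Int := (A.getD i []).getD k 0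

-- mat_mult: [[sum(A[i][k]*B[k][j] for k in range(6)) % MOD for j in range(6)] for i in range(6)]
def pvMatMult (A B : List (List Int)) : List (List Int) :=
  (List.range 6).map (fun i => (List.range 6).map (fun j =>
    ((List.range 6).foldl (fun s k => s + pvGet A i k * pvGet B k j) 0) % (10 ^ 9 + 7)))

-- identity: [[1 if i == j else 0 for j in range(6)] for i in range(6)]
def pvI6 : List (List Int) :=
  (List.range 6).map (fun i => (List.range 6).map (fun j => if i == j then (1 : Int) else 0))

-- mat_pow by square-and-multiply, recursing on e // 2
def pvMatPow (M : List (List Int)) (e : Int) : List (List Int) :=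
  if e ≤ 0 then pvI6
  else
    let half := pvMatPow M (PySem.Int.floordiv e 2)
    let sq := pvMatMult half half
    if PySem.Int.mod e 2 ≠ 0 then pvMatMult sq M else sq
termination_by e.toNat
decreasing_by
  rw [PySem.Int.floordiv_eq_ediv_of_pos (by omega)]; omega

def pvT : List (List Int) :=
  [[1, 1, 1, 0, 0, 0],
   [1, 0, 0, 0, 0, 0],
   [0, 1, 0, 0, 0, 0],
   [1, 1, 1, 1, 1, 1],
   [0, 0, 0, 1, 0, 0],
   [0, 0, 0, 0, 1, 0]]

def checkRecord2_alt (n : Int) : List (List Int) × Int :=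
  let P := pvMatPow pvT n
  let v : List Int := [1, 0, 0, 0, 0, 0]
  -- w = [sum(P[i][k] * v[k] for k in range(6)) % MOD for i in range(6)]
  let w : List Int := (List.range 6).map (fun i =>
    ((List.range 6).foldl (fun s k => s + pvGet P i k * v.getD k 0) 0) % (10 ^ 9 + 7))
  ([PySem.List.slice w none (some 3), PySem.List.slice w (some 3) none],
   (w.foldl (· + ·) 0) % (10 ^ 9 + 7))

-- ===== PRECONDITION & SPEC =====
def Spec_checkRecord2 (n : Int) (out : List (List Int) × Int) : Prop := out = checkRecord2_alt n
instance (n : Int) (out : List (List Int) × Int) : Decidable (Spec_checkRecord2 n out) := by unfold Spec_checkRecord2; infer_instance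

-- ===== CLAIM (what is proved, stated in full; the proofs are below) =====
def Claim_equal_checkRecord2 : Prop := ∀ (n : Int), Dom_checkRecord2 n → Spec_checkRecord2 n (checkRecord2 n)

-- ===== LEMMAS AND PROOFS =====

-- semantic bridge: read a 6x6 Int list-matrix as a matrix over ZMod (10^9+7)
def pvPhi (A : List (List Int)) : Matrix (Fin 6) (Fin 6) (ZMod 1000000007) :=
  Matrix.of fun i j => ((pvGet A i.val j.val : Int) : ZMod 1000000007)

theorem pv_cast_mod (x : Int) :
    ((x % 1000000007 : Int) : ZMod 1000000007) = (x : ZMod 1000000007) := by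
  refine (ZMod.intCast_eq_intCast_iff' _ _ _).mpr ?_
  show (x % 1000000007) % ((1000000007 : Nat) : Int) = x % ((1000000007 : Nat) : Int)
  norm_num [Int.emod_emod_of_dvd]

theorem pv_cast_inj (x y : Int) (hx : 0 ≤ x ∧ x < 1000000007) (hy : 0 ≤ y ∧ y < 1000000007)
    (h : (x : ZMod 1000000007) = (y : ZMod 1000000007)) : x = y := by
  have := (ZMod.intCast_eq_intCast_iff' x y 1000000007).mp h
  unfold Int.ModEq at this
  omega


theorem pv_mul_spec (A B : List (List Int)) :
    pvPhi (pvMatMult A B) = pvPhi A * pvPhi B := by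
  ext i j
  show ((pvGet (pvMatMult A B) i.val j.val : Int) : ZMod 1000000007) = _
  rw [Matrix.mul_apply, Fin.sum_univ_six]
  unfold pvMatMult pvGet
  rw [PySem.List.getD_map_range _ 6 _ _ i.isLt, PySem.List.getD_map_range _ 6 _ _ j.isLt]
  have hr : List.range 6 = [0, 1, 2, 3, 4, 5] := rfl
  rw [hr]
  simp only [List.foldl_cons, List.foldl_nil]
  rw [show ((10 : Int) ^ 9 + 7) = 1000000007 by norm_num, pv_cast_mod]
  simp only [pvPhi, Matrix.of_apply, pvGet]
  push_cast
  simp [Fin.isValue]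

theorem pv_I_spec : pvPhi pvI6 = 1 := by
  ext i j
  show ((pvGet pvI6 i.val j.val : Int) : ZMod 1000000007) = _
  unfold pvI6 pvGet
  rw [PySem.List.getD_map_range _ 6 _ _ i.isLt, PySem.List.getD_map_range _ 6 _ _ j.isLt]
  rw [Matrix.one_apply]
  by_cases h : i = j <;> simp [h, Fin.val_eq_val]

theorem pv_pow_spec (M : List (List Int)) (e : Int) :
    pvPhi (pvMatPow M e) = (pvPhi M) ^ e.toNat := by
  induction e using pvMatPow.induct (M := M) with
  | case1 e he => rw [pvMatPow, if_pos he, pv_I_spec, Int.toNat_of_nonpos he, pow_zero]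
  | case2 e he hodd ih =>
    rw [pvMatPow, if_neg he, if_pos hodd]
    rw [pv_mul_spec, pv_mul_spec, ih]
    rw [PySem.Int.floordiv_eq_ediv_of_pos (by omega)] at *
    rw [← pow_add, ← pow_succ]
    congr 1
    have h2 : PySem.Int.mod e 2 = e % 2 := PySem.Int.mod_eq_emod_of_pos (by norm_num)
    rw [h2] at hodd
    simp at hodd
    omega
  | case3 e he heven ih =>
    rw [pvMatPow, if_neg he, if_neg heven]
    rw [pv_mul_spec, ih]
    rw [PySem.Int.floordiv_eq_ediv_of_pos (by omega)] at *
    rw [← pow_add]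
    congr 1
    have h2 : PySem.Int.mod e 2 = e % 2 := PySem.Int.mod_eq_emod_of_pos (by norm_num)
    rw [h2] at heven
    simp at heven
    omega

-- ===== A-side: the 2x3 matrix DP as a 6-scalar step =====
def pvStep6 (s : Int × Int × Int × Int × Int × Int) : Int × Int × Int × Int × Int × Int :=
  let MOD : Int := 10 ^ 9 + 7
  match s with
  | (d0, d1, d2, e0, e1, e2) =>
      ((d0 + d1 + d2) % MOD, d0, d1, (d0 + d1 + d2 + e0 + e1 + e2) % MOD, e0, e1)

def pvToMat (s : Int × Int × Int × Int × Int × Int) : List (List Int) :=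
  match s with
  | (d0, d1, d2, e0, e1, e2) => [[d0, d1, d2], [e0, e1, e2]]

def pvVec (s : Int × Int × Int × Int × Int × Int) : Fin 6 → ZMod 1000000007 :=
  match s with
  | (d0, d1, d2, e0, e1, e2) => ![(d0 : ZMod 1000000007), d1, d2, e0, e1, e2]

def pvInRange (s : Int × Int × Int × Int × Int × Int) : Prop :=
  match s with
  | (d0, d1, d2, e0, e1, e2) =>
      (0 ≤ d0 ∧ d0 < 10 ^ 9 + 7) ∧ (0 ≤ d1 ∧ d1 < 10 ^ 9 + 7) ∧ (0 ≤ d2 ∧ d2 < 10 ^ 9 + 7) ∧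
      (0 ≤ e0 ∧ e0 < 10 ^ 9 + 7) ∧ (0 ≤ e1 ∧ e1 < 10 ^ 9 + 7) ∧ (0 ≤ e2 ∧ e2 < 10 ^ 9 + 7)

-- a fold whose body ignores the list element is an iterate of length many steps
theorem pv_foldl_const_iterate {α β : Type} (f : α → α) (l : List β) (init : α) :
    l.foldl (fun s _ => f s) init = f^[l.length] init := by
  induction l generalizing init with
  | nil => rfl
  | cons x xs ih => simp [List.foldl_cons, ih, Function.iterate_succ_apply]

-- invariant: after k steps A's matrix is the six scalars, all lying in [0, MOD)
theorem pv_invariant (k : Nat) :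
    pvAstep^[k] [[1, 0, 0], [0, 0, 0]] = pvToMat (pvStep6^[k] (1, 0, 0, 0, 0, 0)) ∧
    pvInRange (pvStep6^[k] (1, 0, 0, 0, 0, 0)) := by
  induction k with
  | zero => exact ⟨rfl, by unfold pvInRange; norm_num⟩
  | succ k ih =>
    obtain ⟨hm, hr⟩ := ih
    rw [Function.iterate_succ_apply', Function.iterate_succ_apply', hm]
    generalize pvStep6^[k] (1, 0, 0, 0, 0, 0) = s at hr ⊢
    obtain ⟨d0, d1, d2, e0, e1, e2⟩ := s
    obtain ⟨h0, h1, h2, h3, h4, h5⟩ := hr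
    refine ⟨?_, ?_⟩
    · show pvAstep [[d0, d1, d2], [e0, e1, e2]] =
        pvToMat ((d0 + d1 + d2) % (10 ^ 9 + 7), d0, d1,
                 (d0 + d1 + d2 + e0 + e1 + e2) % (10 ^ 9 + 7), e0, e1)
      simp [pvAstep, pvAget, pvToMat, PySem.List.pyGetD]
      omega
    · show pvInRange ((d0 + d1 + d2) % (10 ^ 9 + 7), d0, d1,
                 (d0 + d1 + d2 + e0 + e1 + e2) % (10 ^ 9 + 7), e0, e1)
      unfold pvInRange
      refine ⟨⟨?_, ?_⟩, h0, h1, ⟨?_, ?_⟩, h3, h4⟩ <;> omega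

-- one scalar step is multiplication by the transition matrix, over ZMod
theorem pv_step_vec (s : Int × Int × Int × Int × Int × Int) :
    pvVec (pvStep6 s) = (pvPhi pvT).mulVec (pvVec s) := by
  obtain ⟨d0, d1, d2, e0, e1, e2⟩ := s
  funext i
  fin_cases i <;>
    simp [pvStep6, pvVec, Matrix.mulVec, dotProduct, Fin.sum_univ_six, pvPhi, pvT, pvGet,
      pv_cast_mod]

theorem pv_iter_vec (k : Nat) :
    pvVec (pvStep6^[k] (1, 0, 0, 0, 0, 0)) = ((pvPhi pvT) ^ k).mulVec (pvVec (1, 0, 0, 0, 0, 0)) := by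
  induction k with
  | zero => simp
  | succ k ih =>
    rw [Function.iterate_succ_apply', pv_step_vec, ih, Matrix.mulVec_mulVec, pow_succ']

-- the first column of the matrix power, read over ZMod
theorem pv_col_entry (P : List (List Int)) (i : Fin 6) :
    ((pvGet P i.val 0 : Int) : ZMod 1000000007) = (pvPhi P).mulVec (pvVec (1, 0, 0, 0, 0, 0)) i := by
  simp [Matrix.mulVec, dotProduct, Fin.sum_univ_six, pvPhi, pvVec]

-- ===== VERDICT (by name: the statement is the Claim_ definition above) =====
theorem checkRecord2_spec : Claim_equal_checkRecord2 := by
  intro n _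
  show checkRecord2 n = checkRecord2_alt n
  have hM : ((10 : Int) ^ 9 + 7) = 1000000007 := by norm_num
  -- A side: iterate of the scalar step
  have hlen : (PySem.List.pyRange 1 (n + 1) 1).length = n.toNat := by
    simp [PySem.List.length_pyRange_one]
  obtain ⟨hm, hr⟩ := pv_invariant n.toNat
  -- B side: six entries of the first column of T^n
  have hcol : ∀ i : Fin 6,
      ((pvGet (pvMatPow pvT n) i.val 0 : Int) : ZMod 1000000007) =
        pvVec (pvStep6^[n.toNat] (1, 0, 0, 0, 0, 0)) i := by
    intro i
    rw [pv_col_entry, pv_pow_spec, pv_iter_vec]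
  have hrange : ∀ i : Nat, 0 ≤ pvGet (pvMatPow pvT n) i 0 % 1000000007 ∧
      pvGet (pvMatPow pvT n) i 0 % 1000000007 < 1000000007 := by
    intro i
    constructor
    · exact Int.emod_nonneg _ (by norm_num)
    · exact Int.emod_lt_of_pos _ (by norm_num)
  generalize hs : pvStep6^[n.toNat] (1, 0, 0, 0, 0, 0) = s at hm hr hcol
  obtain ⟨d0, d1, d2, e0, e1, e2⟩ := s
  obtain ⟨h0, h1, h2, h3, h4, h5⟩ := hr
  rw [hM] at h0 h1 h2 h3 h4 h5
  -- six component equalities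
  have k0 : d0 = pvGet (pvMatPow pvT n) 0 0 % 1000000007 := by
    refine pv_cast_inj _ _ ⟨h0.1, h0.2⟩ (hrange 0) ?_
    rw [pv_cast_mod]
    exact ((hcol 0).trans (by simp [pvVec])).symm
  have k1 : d1 = pvGet (pvMatPow pvT n) 1 0 % 1000000007 := by
    refine pv_cast_inj _ _ ⟨h1.1, h1.2⟩ (hrange 1) ?_
    rw [pv_cast_mod]
    exact ((hcol 1).trans (by simp [pvVec])).symm
  have k2 : d2 = pvGet (pvMatPow pvT n) 2 0 % 1000000007 := by
    refine pv_cast_inj _ _ ⟨h2.1, h2.2⟩ (hrange 2) ?_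
    rw [pv_cast_mod]
    exact ((hcol 2).trans (by simp [pvVec])).symm
  have k3 : e0 = pvGet (pvMatPow pvT n) 3 0 % 1000000007 := by
    refine pv_cast_inj _ _ ⟨h3.1, h3.2⟩ (hrange 3) ?_
    rw [pv_cast_mod]
    exact ((hcol 3).trans (by simp [pvVec])).symm
  have k4 : e1 = pvGet (pvMatPow pvT n) 4 0 % 1000000007 := by
    refine pv_cast_inj _ _ ⟨h4.1, h4.2⟩ (hrange 4) ?_
    rw [pv_cast_mod]
    exact ((hcol 4).trans (by simp [pvVec])).symm
  have k5 : e2 = pvGet (pvMatPow pvT n) 5 0 % 1000000007 := by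
    refine pv_cast_inj _ _ ⟨h5.1, h5.2⟩ (hrange 5) ?_
    rw [pv_cast_mod]
    exact ((hcol 5).trans (by simp [pvVec])).symm
  -- assemble both return values
  unfold checkRecord2 checkRecord2_alt
  simp only [pv_foldl_const_iterate, hlen, hm]
  have hr6 : List.range 6 = [0, 1, 2, 3, 4, 5] := rfl
  simp [pvToMat, pvAget, PySem.List.pyGetD, hr6, PySem.List.slice, PySem.List.clampIdx,
    k0, k1, k2, k3, k4, k5]
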